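-- pv_equiv track=rewrite | github.com/brandgor7/tennis_league | playoffs/generator.py | _seed_order
-- ===== SOURCE A (Python) =====
-- def _seed_order(n):
--     """
--     Return the 1-indexed seed positions in bracket slot order for a bracket of size n.
--     Consecutive pairs are first-round opponents.
--     """
--     if n == 1:
--         return [1]
--     prev = _seed_order(n // 2)
--     result = []
--     for s in prev:
--         result.append(s)
--         result.append(n + 1 - s)
--     return result
-- ===== SOURCE B (Python) =====
-- def _seed_order(n):
--     """
--     Return the 1-indexed seed positions in bracket slot order for a bracket of size n.
--     Consecutive pairs are first-round opponents.
--     """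
--     def _size(m):
--         return 1 if m == 1 else 2 * _size(m // 2)
--
--     def _seed(i, m):
--         # seed landing in slot i of a bracket built for size m
--         if m == 1:
--             return 1
--         s = _seed(i // 2, m // 2)
--         return s if i % 2 == 0 else m + 1 - s
--
--     return [_seed(i, n) for i in range(_size(n))]
-- ===== Notes on version B (the rewrite author's own statement) =====
-- stated objective: alternative
-- what changed: Each output slot's seed is computed independently by a recursion on the slot index's bits (plus a recursive slot count), replacing A's bottom-up list-doubling over the whole bracket.
import Mathlib
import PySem

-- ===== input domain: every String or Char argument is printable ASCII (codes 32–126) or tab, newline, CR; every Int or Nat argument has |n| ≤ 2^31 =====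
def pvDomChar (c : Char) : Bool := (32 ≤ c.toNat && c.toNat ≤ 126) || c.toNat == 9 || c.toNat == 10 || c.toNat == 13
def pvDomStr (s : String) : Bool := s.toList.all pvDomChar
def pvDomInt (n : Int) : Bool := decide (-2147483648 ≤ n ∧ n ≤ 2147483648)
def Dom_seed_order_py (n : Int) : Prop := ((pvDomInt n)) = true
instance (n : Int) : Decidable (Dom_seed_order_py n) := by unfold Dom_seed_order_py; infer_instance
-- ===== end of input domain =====

-- B computes each slot's seed independently by recursing on the slot index's bits
-- (plus a recursive slot count), instead of A's list-doubling; objective: alternative.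

-- ===== PORT A =====
-- Python A recurses on n // 2; for n ≤ 0 it never reaches the base case (RecursionError),
-- excluded by Pre_; the guard below only makes the Lean recursion total.
def seed_order_py (n : Int) : List Int :=
  if _h0 : n < 1 then []          -- unreachable under Pre_ (Python raises RecursionError)
  else if _h1 : n = 1 then [1]
  else
    (seed_order_py (PySem.Int.floordiv n 2)).foldl
      (fun result s => result ++ [s] ++ [n + 1 - s]) []
termination_by n.toNat
decreasing_by
  rw [PySem.Int.floordiv_eq_ediv_of_pos (by omega : (0:Int) < 2)]
  omega

-- ===== PORT B =====
-- _size(m): number of output slots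
def pvSize (m : Int) : Int :=
  if _h0 : m < 1 then 0           -- unreachable under Pre_ (Python raises RecursionError)
  else if _h1 : m = 1 then 1
  else 2 * pvSize (PySem.Int.floordiv m 2)
termination_by m.toNat
decreasing_by
  rw [PySem.Int.floordiv_eq_ediv_of_pos (by omega : (0:Int) < 2)]
  omega

-- _seed(i, m): seed landing in slot i of a bracket built for size m
def pvSeed (i m : Int) : Int :=
  if _h0 : m < 1 then 0           -- unreachable under Pre_
  else if _h1 : m = 1 then 1
  else
    let s := pvSeed (PySem.Int.floordiv i 2) (PySem.Int.floordiv m 2)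
    if PySem.Int.mod i 2 = 0 then s else m + 1 - s
termination_by m.toNat
decreasing_by
  rw [PySem.Int.floordiv_eq_ediv_of_pos (by omega : (0:Int) < 2)]
  omega

def seed_order_py_alt (n : Int) : List Int :=
  (PySem.List.pyRange 0 (pvSize n) 1).map (fun i => pvSeed i n)

-- ===== PRECONDITION & SPEC =====
-- Pre_ excludes n ≤ 0, where Python A (and B) hit an unbounded recursion (RecursionError).
def Pre_seed_order_py (n : Int) : Prop := 1 ≤ n
instance (n : Int) : Decidable (Pre_seed_order_py n) := by unfold Pre_seed_order_py; infer_instance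
def pvWitness_seed_order_py : Int := (8)

def Spec_seed_order_py (n : Int) (out : List Int) : Prop := out = seed_order_py_alt n
instance (n : Int) (out : List Int) : Decidable (Spec_seed_order_py n out) := by unfold Spec_seed_order_py; infer_instance

-- ===== CLAIM (what is proved, stated in full; the proofs are below) =====
def Claim_equal_seed_order_py : Prop := ∀ (n : Int), Dom_seed_order_py n → Pre_seed_order_py n → Spec_seed_order_py n (seed_order_py n)

-- ===== LEMMAS AND PROOFS =====

-- range(2*d) split into consecutive even/odd pairs
lemma range_double_flatMap {α : Type} (g : Nat → α) (d : Nat) :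
    (List.range (2 * d)).map g
      = (List.range d).flatMap (fun j => [g (2 * j), g (2 * j + 1)]) := by
  induction d with
  | zero => simp
  | succ d ih =>
    have h2 : 2 * (d + 1) = (2 * d + 1) + 1 := by omega
    rw [h2, List.range_succ, List.range_succ, List.range_succ]
    simp [ih]

lemma pvSize_unfold_step (n : Int) (h : 2 ≤ n) :
    pvSize n = 2 * pvSize (PySem.Int.floordiv n 2) := by
  rw [pvSize]
  simp [show ¬ n < 1 by omega, show n ≠ 1 by omega]

lemma pvSize_nonneg (n : Int) : 0 ≤ pvSize n := by
  rw [pvSize]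
  split
  · simp
  · split
    · simp
    · have := pvSize_nonneg (PySem.Int.floordiv n 2)
      omega
termination_by n.toNat
decreasing_by
  rw [PySem.Int.floordiv_eq_ediv_of_pos (by omega : (0:Int) < 2)]
  omega

lemma pvSeed_even (j n : Int) (h : 2 ≤ n) :
    pvSeed (2 * j) n = pvSeed j (PySem.Int.floordiv n 2) := by
  rw [pvSeed]
  have hdiv : (2 * j) / 2 = j := by omega
  have hmod : (2 * j) % 2 = 0 := by omega
  simp [show ¬ n < 1 by omega, show n ≠ 1 by omega, hdiv, hmod]

lemma pvSeed_odd (j n : Int) (h : 2 ≤ n) :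
    pvSeed (2 * j + 1) n = n + 1 - pvSeed j (PySem.Int.floordiv n 2) := by
  rw [pvSeed]
  have hdiv : (2 * j + 1) / 2 = j := by omega
  have hmod : (2 * j + 1) % 2 = 1 := by omega
  simp [show ¬ n < 1 by omega, show n ≠ 1 by omega, hdiv, hmod]

lemma alt_step (n : Int) (h : 2 ≤ n) :
    seed_order_py_alt n
      = (seed_order_py_alt (PySem.Int.floordiv n 2)).flatMap (fun s => [s, n + 1 - s]) := by
  unfold seed_order_py_alt
  set m := PySem.Int.floordiv n 2 with hm
  have hc : 0 ≤ pvSize m := pvSize_nonneg m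
  rw [pvSize_unfold_step n h, PySem.List.pyRange_one, PySem.List.pyRange_one]
  simp only [sub_zero, List.map_map, Function.comp_def, zero_add]
  have ht : (2 * pvSize m).toNat = 2 * (pvSize m).toNat := by omega
  rw [ht, range_double_flatMap (fun k => pvSeed ((k:Int)) n) (pvSize m).toNat,
    List.flatMap_map]
  apply List.flatMap_congr  -- pointwise equality of the pair functions
  intro j _
  have e1 : ((2 * j : Nat) : Int) = 2 * (j:Int) := by push_cast; ring
  have e2 : ((2 * j + 1 : Nat) : Int) = 2 * (j:Int) + 1 := by push_cast; ring
  simp only [e1, e2, pvSeed_even _ n h, pvSeed_odd _ n h]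
  rw [← hm]

lemma main_eq (n : Int) (h : 1 ≤ n) : seed_order_py n = seed_order_py_alt n := by
  rw [seed_order_py]
  by_cases h1 : n = 1
  · subst h1
    have hs : pvSize 1 = 1 := by rw [pvSize]; norm_num
    have hd : pvSeed 0 1 = 1 := by rw [pvSeed]; norm_num
    have hr : PySem.List.pyRange 0 1 1 = [0] := by decide
    simp [seed_order_py_alt, hs, hr, hd]
  · have h2 : 2 ≤ n := by omega
    have hm : 1 ≤ PySem.Int.floordiv n 2 := by
      rw [PySem.Int.floordiv_eq_ediv_of_pos (by omega : (0:Int) < 2)]; omega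
    have ih := main_eq (PySem.Int.floordiv n 2) hm
    simp only [show ¬ n < 1 by omega, dite_false, h1]
    have hfun : (fun (result : List Int) (s : Int) => result ++ [s] ++ [n + 1 - s])
        = fun result s => result ++ [s, n + 1 - s] := by
      funext result s
      simp
    rw [hfun, PySem.List.foldl_append_eq_flatMap, ih, alt_step n h2]
    simp
termination_by n.toNat
decreasing_by
  rw [PySem.Int.floordiv_eq_ediv_of_pos (by omega : (0:Int) < 2)]
  omega

-- ===== VERDICT (by name: the statement is the Claim_ definition above) =====
theorem seed_order_py_spec : Claim_equal_seed_order_py := by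
  intro n _ hpre
  unfold Spec_seed_order_py
  exact main_eq n hpre
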